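-- pv_equiv track=rewrite | github.com/rpatel0022/Leetcode_Problems | LargestPossibleNegativePair.py | find_largest_k
-- ===== SOURCE A (Python) =====
-- def find_largest_k(nums):
--   num_dict = {}
--   largest_k = -1
--
--   for num in nums:
--     num_dict[num] = True
--
--     if -num in num_dict:
--       largest_k = max(largest_k, abs(num))
--
--   return largest_k
--
-- nums = [-1, 2, -3, 3, -1]
-- ===== SOURCE B (Python) =====
-- def find_largest_k(nums):
--     a = sorted(nums)
--     while a:
--         s = a[0] + a[-1]
--         if s == 0:
--             return a[-1]
--         if s < 0:
--             a = a[1:]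
--         else:
--             a = a[:-1]
--     return -1
-- ===== Notes on version B (the rewrite author's own statement) =====
-- stated objective: alternative
-- what changed: Replaces A's hash-dict single pass with a sort-then-two-pointer algorithm: sort the list, then repeatedly compare the smallest and largest remaining values, returning the larger one when they sum to zero and discarding the unpairable end otherwise.
import Mathlib
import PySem

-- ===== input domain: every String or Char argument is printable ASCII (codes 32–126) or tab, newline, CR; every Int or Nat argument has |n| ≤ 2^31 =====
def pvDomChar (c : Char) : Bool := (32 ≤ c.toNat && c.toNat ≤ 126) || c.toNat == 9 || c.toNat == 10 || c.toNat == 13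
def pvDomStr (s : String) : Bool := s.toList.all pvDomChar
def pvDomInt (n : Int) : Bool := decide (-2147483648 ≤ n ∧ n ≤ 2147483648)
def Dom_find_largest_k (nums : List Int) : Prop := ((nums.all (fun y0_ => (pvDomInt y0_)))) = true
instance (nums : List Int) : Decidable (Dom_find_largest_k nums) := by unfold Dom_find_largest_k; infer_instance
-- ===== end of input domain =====

-- B replaces A's hash-dict single pass by sort-then-two-pointer: sort, then repeatedly
-- compare the smallest and largest remaining values, returning the larger on a zero sum
-- and discarding the unpairable end otherwise (alternative algorithm, not faster).

-- ===== PORT A =====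
-- literal transliteration: dict grows as the loop runs, `-num in num_dict` checked
-- after inserting num, largest_k updated with max(largest_k, abs(num))
def find_largest_k (nums : List Int) : Int :=
  (nums.foldl
    (fun (st : PySem.Dict Int Bool × Int) num =>
      let d := st.1.insert num true
      if d.contains (-num) then (d, max st.2 |num|) else (d, st.2))
    (PySem.Dict.empty, -1)).2

-- ===== PORT B =====
-- the while loop of Source B: on a nonempty list, a[0] is the head, a[-1] its getLast,
-- a[1:] the tail and a[:-1] its dropLast (exactly Python's slices on a nonempty list)
def pvShrink : List Int → Int
  | [] => -1
  | x :: rest =>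
    let last := (x :: rest).getLast (by simp)
    if x + last = 0 then last
    else if x + last < 0 then pvShrink rest
    else pvShrink (x :: rest).dropLast
termination_by l => l.length
decreasing_by
  · simp
  · simp

-- literal transliteration of Source B: a = sorted(nums), then the shrink-from-both-ends loop
def find_largest_k_alt (nums : List Int) : Int :=
  pvShrink (PySem.List.sorted nums (fun x => x) false)

-- ===== PRECONDITION & SPEC =====
def Spec_find_largest_k (nums : List Int) (out : Int) : Prop := out = find_largest_k_alt nums
instance (nums : List Int) (out : Int) : Decidable (Spec_find_largest_k nums out) := by unfold Spec_find_largest_k; infer_instance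

-- ===== CLAIM (what is proved, stated in full; the proofs are below) =====
def Claim_equal_find_largest_k : Prop := ∀ (nums : List Int), Dom_find_largest_k nums → Spec_find_largest_k nums (find_largest_k nums)

-- ===== LEMMAS AND PROOFS =====

/-- Characterisation of the answer: r is -1 or the abs of some paired value, and
    bounds the abs of every paired value. -/
def GoodMax (nums : List Int) (r : Int) : Prop :=
  -1 ≤ r ∧ (r = -1 ∨ ∃ x ∈ nums, -x ∈ nums ∧ r = |x|) ∧ ∀ x ∈ nums, -x ∈ nums → |x| ≤ r

theorem goodMax_unique {nums : List Int} {r r' : Int}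
    (h : GoodMax nums r) (h' : GoodMax nums r') : r = r' := by
  obtain ⟨hle, hmem, hub⟩ := h
  obtain ⟨hle', hmem', hub'⟩ := h'
  rcases hmem with rfl | ⟨x, hx, hnx, rfl⟩ <;> rcases hmem' with rfl | ⟨y, hy, hny, rfl⟩
  · rfl
  · have := hub y hy hny; omega
  · have := hub' x hx hnx; omega
  · have := hub y hy hny; have := hub' x hx hnx; omega

theorem pairwise_le_getLast {l : List Int} (hs : l.Pairwise (· ≤ ·)) (hne : l ≠ []) :
    ∀ y ∈ l, y ≤ l.getLast hne := by
  induction l with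
  | nil => simp
  | cons a t ih =>
    intro y hy
    match t with
    | [] =>
      have hya : y = a := by simpa using hy
      subst hya; simp
    | b :: t' =>
      rw [List.getLast_cons (by simp)]
      rcases List.mem_cons.mp hy with rfl | hy'
      · exact le_trans ((List.pairwise_cons.mp hs).1 _ (List.getLast_mem _))
          (le_refl _)
      · exact ih (List.Pairwise.of_cons hs) (by simp) y hy'

/-- The shrink loop computes a GoodMax value whenever its argument is a sorted
    sublist of nums containing every paired value of nums. -/
theorem shrink_good (nums : List Int) :
    ∀ (n : Nat) (seg : List Int), seg.length ≤ n →
    seg.Pairwise (· ≤ ·) →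
    (∀ x ∈ seg, x ∈ nums) →
    (∀ x ∈ nums, -x ∈ nums → x ∈ seg) →
    GoodMax nums (pvShrink seg) := by
  intro n
  induction n with
  | zero =>
    intro seg hlen _ _ hpaired
    have : seg = [] := List.eq_nil_of_length_eq_zero (Nat.le_zero.mp hlen)
    subst this
    rw [pvShrink]
    refine ⟨le_rfl, Or.inl rfl, ?_⟩
    intro x hx hnx
    exact absurd (hpaired x hx hnx) (by simp)
  | succ n ih =>
    intro seg hlen hsort hsub hpaired
    match seg with
    | [] =>
      rw [pvShrink]
      refine ⟨le_rfl, Or.inl rfl, ?_⟩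
      intro x hx hnx
      exact absurd (hpaired x hx hnx) (by simp)
    | x :: rest =>
      rw [pvShrink]
      set last := (x :: rest).getLast (by simp) with hlastdef
      have hlastmem : last ∈ x :: rest := List.getLast_mem _
      have hle_last : ∀ y ∈ x :: rest, y ≤ last := by
        rw [hlastdef]
        exact pairwise_le_getLast hsort (by simp)
      have hhead_le : ∀ y ∈ x :: rest, x ≤ y := by
        intro y hy
        rcases List.mem_cons.mp hy with rfl | hy
        · exact le_rfl
        · exact (List.pairwise_cons.mp hsort).1 y hy
      by_cases h0 : x + last = 0
      · rw [if_pos h0]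
        have hx_le : x ≤ last := hle_last x (by simp)
        have hlast_nonneg : (0:Int) ≤ last := by omega
        refine ⟨by omega, Or.inr ⟨last, hsub _ hlastmem, ?_, (abs_of_nonneg hlast_nonneg).symm⟩, ?_⟩
        · have : -last = x := by omega
          rw [this]; exact hsub _ (by simp)
        · intro y hy hny
          have hyseg := hpaired y hy hny
          have h1 := hhead_le y hyseg
          have h2 := hle_last y hyseg
          rw [abs_le]; omega
      · rw [if_neg h0]
        by_cases hneg : x + last < 0
        · rw [if_pos hneg]
          apply ih rest (by simpa using Nat.lt_succ_iff.mp (Nat.lt_of_lt_of_le (by simp) hlen))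
            (List.Pairwise.of_cons hsort)
            (fun y hy => hsub y (List.mem_cons_of_mem _ hy))
          intro y hy hny
          have hyseg := hpaired y hy hny
          rcases List.mem_cons.mp hyseg with rfl | hrest
          · -- y = x: its partner -x would also be paired, hence in seg, hence ≤ last
            exfalso
            have hnyseg := hpaired (-y) hny (by simpa using hy)
            have := hle_last _ hnyseg
            omega
          · exact hrest
        · rw [if_neg hneg]
          have hdecomp : x :: rest = (x :: rest).dropLast ++ [last] := by
            rw [hlastdef]
            exact (List.dropLast_append_getLast (by simp)).symm
          apply ih ((x :: rest).dropLast)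
            (by simp at hlen ⊢; omega)
            (by
              have : ((x :: rest).dropLast).Sublist (x :: rest) := List.dropLast_sublist _
              exact hsort.sublist this)
            (fun y hy => hsub y ((List.dropLast_sublist _).mem hy))
          intro y hy hny
          have hyseg := hpaired y hy hny
          by_cases hylast : y = last
          · -- y = last: its partner -last would also be paired, in seg, hence ≥ x
            exfalso
            have hnyseg := hpaired (-y) hny (by simpa using hy)
            have := hhead_le _ hnyseg
            omega
          · rw [hdecomp] at hyseg
            rcases List.mem_append.mp hyseg with h | h
            · exact h
            · exact absurd (by simpa using h) hylast

theorem goodMax_alt (nums : List Int) : GoodMax nums (find_largest_k_alt nums) := by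
  unfold find_largest_k_alt
  set s := PySem.List.sorted nums (fun x => x) false with hs
  have hperm : s.Perm nums := PySem.List.sorted_perm nums (fun x => x) false
  have hmem : ∀ v : Int, v ∈ s ↔ v ∈ nums := fun v => hperm.mem_iff
  exact shrink_good nums s.length s le_rfl
    (by simpa using PySem.List.sorted_pairwise nums (fun x => x))
    (fun y hy => (hmem y).mp hy)
    (fun y hy _ => (hmem y).mpr hy)

/-- Loop invariant for A's fold: after processing prefix `p`, the dict holds exactly
    the values of `p` and the accumulator satisfies GoodMax on `p`. -/
theorem a_loop (t : List Int) : ∀ (p : List Int) (d : PySem.Dict Int Bool) (k : Int),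
    (∀ v : Int, d.contains v = true ↔ v ∈ p) →
    -1 ≤ k → (k = -1 ∨ ∃ x ∈ p, -x ∈ p ∧ k = |x|) →
    (∀ x ∈ p, -x ∈ p → |x| ≤ k) →
    GoodMax (p ++ t)
      ((t.foldl
        (fun (st : PySem.Dict Int Bool × Int) num =>
          let d := st.1.insert num true
          if d.contains (-num) then (d, max st.2 |num|) else (d, st.2))
        (d, k)).2) := by
  induction t with
  | nil =>
    intro p d k _ h1 h2 h3
    simpa using ⟨h1, h2, h3⟩
  | cons num t ih =>
    intro p d k hd hk hmem hub
    simp only [List.foldl_cons]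
    have hd' : ∀ v : Int, (d.insert num true).contains v = true ↔ v ∈ p ++ [num] := by
      intro v
      rw [PySem.Dict.contains_insert]
      simp [hd v, or_comm]
    have hcond : (d.insert num true).contains (-num) = true ↔ -num ∈ p ++ [num] := hd' (-num)
    have happ : (p ++ [num]) ++ t = p ++ (num :: t) := by simp
    by_cases hc : (d.insert num true).contains (-num) = true
    · have hnm : -num ∈ p ++ [num] := hcond.mp hc
      rw [if_pos hc]
      have := ih (p ++ [num]) (d.insert num true) (max k |num|) hd'
        (le_trans hk (le_max_left _ _))
        (by
          rcases max_choice k |num| with hm | hm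
          · rw [hm]
            rcases hmem with rfl | ⟨x, hx, hnx, rfl⟩
            · have : (0:Int) ≤ |num| := abs_nonneg num
              have : |num| ≤ -1 := by rw [← hm]; exact le_max_right _ _
              omega
            · exact Or.inr ⟨x, by simp [hx], by simp [hnx], rfl⟩
          · rw [hm]
            exact Or.inr ⟨num, by simp, hnm, rfl⟩)
        (by
          intro x hx hnx
          rcases List.mem_append.mp hx with hx | hx
          · rcases List.mem_append.mp hnx with hnx | hnx
            · exact le_trans (hub x hx hnx) (le_max_left _ _)
            · have hxeq : x = -num := by
                have : -x = num := by simpa using hnx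
                omega
              rw [hxeq, abs_neg]
              exact le_max_right k |num|
          · have hxeq : x = num := by simpa using hx
            rw [hxeq]
            exact le_max_right k |num|)
      rwa [happ] at this
    · rw [if_neg hc]
      have hnm : ¬ (-num ∈ p ++ [num]) := fun h => hc (hcond.mpr h)
      have := ih (p ++ [num]) (d.insert num true) k hd' hk
        (by
          rcases hmem with rfl | ⟨x, hx, hnx, rfl⟩
          · exact Or.inl rfl
          · exact Or.inr ⟨x, by simp [hx], by simp [hnx], rfl⟩)
        (by
          intro x hx hnx
          rcases List.mem_append.mp hx with hx | hx
          · rcases List.mem_append.mp hnx with hnx | hnx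
            · exact hub x hx hnx
            · exfalso
              apply hnm
              have : -x = num := by simpa using hnx
              have : x = -num := by omega
              exact List.mem_append.mpr (Or.inl (this ▸ hx))
          · exfalso
            have hxeq : x = num := by simpa using hx
            rw [hxeq] at hnx
            exact hnm hnx)
      rwa [happ] at this

theorem goodMax_a (nums : List Int) : GoodMax nums (find_largest_k nums) := by
  have := a_loop nums [] PySem.Dict.empty (-1)
    (by intro v; simp [PySem.Dict.contains_empty])
    le_rfl (Or.inl rfl) (by intro x hx; simp at hx)
  simpa [find_largest_k] using this

-- ===== VERDICT (by name: the statement is the Claim_ definition above) =====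
theorem find_largest_k_spec : Claim_equal_find_largest_k := by
  intro nums _
  exact goodMax_unique (goodMax_a nums) (goodMax_alt nums)
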